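-- pv_equiv track=rewrite | github.com/outsourcing-dev/holdem-auto-trader | utils/prediction_engine.py | has_streak
-- ===== SOURCE A (Python) =====
-- def has_streak(result_list, target, count):
--     """특정 패턴의 연속 여부 확인"""
--     streak = 0
--     for r in reversed(result_list):
--         if r == target:
--             streak += 1
--             if streak >= count:
--                 return True
--         else:
--             streak = 0
--     return False
-- ===== SOURCE B (Python) =====
-- def has_streak(result_list, target, count):
--     """특정 패턴의 연속 여부 확인"""
--     # group-first scan: skip over each maximal run of equal elements and
--     # test the run's length, instead of maintaining a reset-on-mismatch counter
--     i, n = 0, len(result_list)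
--     while i < n:
--         j = i + 1
--         while j < n and result_list[j] == result_list[i]:
--             j += 1
--         if result_list[i] == target and j - i >= count:
--             return True
--         i = j
--     return False
-- ===== Notes on version B (the rewrite author's own statement) =====
-- stated objective: alternative
-- what changed: B scans forward over maximal runs of equal elements (inner loop skips each whole run, then its length is compared to count) instead of A's reversed-order reset-on-mismatch counter.
import Mathlib
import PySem

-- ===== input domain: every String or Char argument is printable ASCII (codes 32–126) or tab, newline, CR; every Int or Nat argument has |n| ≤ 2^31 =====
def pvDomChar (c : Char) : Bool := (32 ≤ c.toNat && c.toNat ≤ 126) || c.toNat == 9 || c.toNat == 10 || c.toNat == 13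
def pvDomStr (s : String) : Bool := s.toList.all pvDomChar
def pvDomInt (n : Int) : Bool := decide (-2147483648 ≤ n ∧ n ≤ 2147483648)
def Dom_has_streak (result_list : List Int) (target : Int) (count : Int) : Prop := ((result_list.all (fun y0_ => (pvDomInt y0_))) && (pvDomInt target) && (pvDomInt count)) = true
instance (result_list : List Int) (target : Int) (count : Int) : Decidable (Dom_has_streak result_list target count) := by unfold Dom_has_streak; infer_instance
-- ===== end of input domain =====

-- B replaces A's reversed-order reset-on-mismatch counter by a forward scan over maximal
-- runs of equal elements (alternative decomposition, same O(n) cost).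

-- ===== PORT A =====
-- 'for r in reversed(result_list)' with the streak counter; 'return True' = true,
-- falling off the loop = false
def has_streak_loop (target count streak : Int) : List Int → Bool
  | [] => false
  | r :: rest =>
    if r = target then
      if streak + 1 ≥ count then true
      else has_streak_loop target count (streak + 1) rest
    else has_streak_loop target count 0 rest

def has_streak (result_list : List Int) (target : Int) (count : Int) : Bool :=
  has_streak_loop target count 0 result_list.reverse

-- ===== PORT B =====
-- outer while: the inner while advances j over the maximal run of elements equal to
-- result_list[i] (= takeWhile), the run's length is tested, and the scan resumes at
-- i = j, i.e. on the list with that run dropped (= dropWhile)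
def has_streak_alt_go (target count : Int) : List Int → Bool
  | [] => false
  | x :: xs =>
    let run := xs.takeWhile (fun y => y == x)
    if x = target ∧ (1 + (run.length : Int)) ≥ count then true
    else has_streak_alt_go target count (xs.dropWhile (fun y => y == x))
termination_by l => l.length
decreasing_by
  simp only [List.length_cons]
  exact Nat.lt_succ_of_le (List.dropWhile_sublist _).length_le

def has_streak_alt (result_list : List Int) (target : Int) (count : Int) : Bool :=
  has_streak_alt_go target count result_list

-- ===== PRECONDITION & SPEC =====
def Spec_has_streak (result_list : List Int) (target : Int) (count : Int) (out : Bool) : Prop := out = has_streak_alt result_list target count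
instance (result_list : List Int) (target : Int) (count : Int) (out : Bool) : Decidable (Spec_has_streak result_list target count out) := by unfold Spec_has_streak; infer_instance

-- ===== CLAIM (what is proved, stated in full; the proofs are below) =====
def Claim_equal_has_streak : Prop := ∀ (result_list : List Int) (target : Int) (count : Int), Dom_has_streak result_list target count → Spec_has_streak result_list target count (has_streak result_list target count)

-- ===== LEMMAS AND PROOFS =====

-- the common specification: the list contains max(count,1) consecutive targets
def streakNeed (count : Int) : Nat := (max count 1).toNat

theorem streakNeed_pos (count : Int) : 1 ≤ streakNeed count := by
  unfold streakNeed; omega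

theorem rep_prefix_head {t : Int} {m : Nat} {l : List Int}
    (h : List.replicate (m + 1) t <+: l) : l.head? = some t := by
  obtain ⟨u, hu⟩ := h
  subst hu
  simp [List.replicate_succ]

theorem rep_prefix_mono {t : Int} {m m' : Nat} (hm : m' ≤ m) {l : List Int}
    (h : List.replicate m t <+: l) : List.replicate m' t <+: l := by
  refine List.IsPrefix.trans ?_ h
  refine ⟨List.replicate (m - m') t, ?_⟩
  rw [← List.replicate_add]
  congr 1
  omega

theorem rep_prefix_rep {t : Int} (j : Nat) (m : Nat) (ys : List Int)
    (hy : ys.head? ≠ some t) :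
    (List.replicate m t <+: List.replicate j t ++ ys ↔ m ≤ j) := by
  induction j generalizing m with
  | zero =>
    cases m with
    | zero => simp
    | succ m =>
      simp only [List.replicate_zero, List.nil_append]
      constructor
      · intro h; exact absurd (rep_prefix_head h) hy
      · omega
  | succ j ih =>
    cases m with
    | zero => simp
    | succ m =>
      rw [List.replicate_succ, List.replicate_succ, List.cons_append,
        List.cons_prefix_cons]
      simp only [true_and]
      rw [ih m]
      omega

theorem rep_infix_run (t count : Int) (n : Nat) (k : Int) (ys : List Int)
    (hy : ys.head? ≠ some k) :
    (List.replicate (streakNeed count) t <:+: List.replicate n k ++ ys ↔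
      (k = t ∧ streakNeed count ≤ n) ∨ List.replicate (streakNeed count) t <:+: ys) := by
  induction n with
  | zero =>
    have := streakNeed_pos count
    simp only [List.replicate_zero, List.nil_append]
    constructor
    · intro h; right; exact h
    · rintro (⟨_, h⟩ | h)
      · omega
      · exact h
  | succ n ih =>
    rw [List.replicate_succ, List.cons_append, List.infix_cons_iff, ih]
    constructor
    · rintro (hpre | h | h)
      · by_cases hk : k = t
        · subst hk
          rw [show (k :: (List.replicate n k ++ ys)) = List.replicate (n + 1) k ++ ys by
              rw [List.replicate_succ, List.cons_append]] at hpre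
          left
          exact ⟨rfl, (rep_prefix_rep (n + 1) _ ys hy).mp hpre⟩
        · exfalso
          obtain ⟨m, hm⟩ : ∃ m, streakNeed count = m + 1 := by
            have := streakNeed_pos count; exact ⟨streakNeed count - 1, by omega⟩
          rw [hm] at hpre
          have := rep_prefix_head hpre
          simp only [List.head?_cons, Option.some.injEq] at this
          exact hk this
      · left; exact ⟨h.1, by omega⟩
      · right; exact h
    · rintro (⟨rfl, h⟩ | h)
      · by_cases hn : streakNeed count ≤ n
        · right; left; exact ⟨rfl, hn⟩
        · left
          rw [show (k :: (List.replicate n k ++ ys)) = List.replicate (n + 1) k ++ ys by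
              rw [List.replicate_succ, List.cons_append]]
          exact (rep_prefix_rep (n + 1) _ ys hy).mpr (by omega)
      · right; right; exact h

-- A's loop: true iff a prefix of max(count-streak,1) consecutive targets, or
-- max(count,1) consecutive targets somewhere
theorem lemA (t c : Int) (l : List Int) : ∀ (s : Int), 0 ≤ s →
    (has_streak_loop t c s l = true ↔
      (List.replicate (max (c - s) 1).toNat t <+: l ∨
        List.replicate (streakNeed c) t <:+: l)) := by
  induction l with
  | nil =>
    intro s _
    have h2 := streakNeed_pos c
    have h1 : (1 : Int) ≤ max (c - s) 1 := le_max_right _ _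
    simp only [has_streak_loop, List.prefix_nil, List.infix_nil,
      List.replicate_eq_nil_iff, Bool.false_eq_true, false_iff]
    omega
  | cons r rest ih =>
    intro s hs
    have hM := streakNeed_pos c
    obtain ⟨m, hm⟩ : ∃ m, (max (c - s) 1).toNat = m + 1 := ⟨(max (c - s) 1).toNat - 1, by omega⟩
    by_cases hr : r = t
    · subst hr
      by_cases hc : s + 1 ≥ c
      · -- early return: the needed prefix is one element
        have : (max (c - s) 1).toNat = 1 := by omega
        simp only [has_streak_loop, if_pos hc, this, if_true]
        constructor
        · intro _
          left
          exact ⟨rest, by simp [List.replicate_succ]⟩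
        · intro _; trivial
      · -- continue with streak+1
        have hrec := ih (s + 1) (by omega)
        simp only [has_streak_loop, if_neg hc, if_true]
        rw [hrec]
        have hms : (max (c - s) 1).toNat = (max (c - (s + 1)) 1).toNat + 1 := by omega
        have hMs : streakNeed c = (streakNeed c - 1) + 1 := by omega
        constructor
        · rintro (h | h)
          · left
            rw [hms, List.replicate_succ]
            exact List.cons_prefix_cons.mpr ⟨rfl, h⟩
          · right; exact List.infix_cons h
        · rintro (h | h)
          · left
            rw [hms, List.replicate_succ] at h
            exact (List.cons_prefix_cons.mp h).2
          · rw [List.infix_cons_iff] at h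
            rcases h with h | h
            · -- a prefix of streakNeed c targets starting at the head: trim to what is needed
              left
              rw [hMs, List.replicate_succ] at h
              have := (List.cons_prefix_cons.mp h).2
              exact rep_prefix_mono (by unfold streakNeed; omega) this
            · right; exact h
    · -- mismatch: streak resets to 0
      have hrec := ih 0 le_rfl
      simp only [has_streak_loop, if_neg hr]
      rw [hrec]
      have h0 : (max (c - 0) 1).toNat = streakNeed c := by unfold streakNeed; omega
      rw [h0]
      constructor
      · rintro (h | h)
        · right; exact List.infix_cons h.isInfix
        · right; exact List.infix_cons h
      · rintro (h | h)
        · exfalso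
          rw [hm] at h
          have := rep_prefix_head h
          simp only [List.head?_cons, Option.some.injEq] at this
          exact hr this
        · rw [List.infix_cons_iff] at h
          rcases h with h | h
          · exfalso
            obtain ⟨m', hm'⟩ : ∃ m', streakNeed c = m' + 1 := ⟨streakNeed c - 1, by omega⟩
            rw [hm'] at h
            have := rep_prefix_head h
            simp only [List.head?_cons, Option.some.injEq] at this
            exact hr this
          · right; exact h

theorem dropWhile_head_not {p : Int → Bool} : ∀ (xs : List Int) (a : Int),
    (xs.dropWhile p).head? = some a → p a = false := by
  intro xs
  induction xs with
  | nil => intro a h; simp [List.dropWhile] at h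
  | cons x xs ih =>
    intro a h
    rw [List.dropWhile_cons] at h
    split at h
    · exact ih a h
    · simp only [List.head?_cons, Option.some.injEq] at h
      subst h
      simp_all

-- B's run scan: true iff max(count,1) consecutive targets somewhere
theorem lemB (t c : Int) : ∀ (N : Nat) (l : List Int), l.length ≤ N →
    (has_streak_alt_go t c l = true ↔ List.replicate (streakNeed c) t <:+: l) := by
  intro N
  induction N with
  | zero =>
    intro l hl
    have : l = [] := List.eq_nil_of_length_eq_zero (by omega)
    subst this
    have := streakNeed_pos c
    simp only [has_streak_alt_go, List.infix_nil, List.replicate_eq_nil_iff,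
      Bool.false_eq_true, false_iff]
    omega
  | succ N ih =>
    intro l hl
    match l with
    | [] =>
      have := streakNeed_pos c
      simp only [has_streak_alt_go, List.infix_nil, List.replicate_eq_nil_iff,
        Bool.false_eq_true, false_iff]
      omega
    | x :: xs =>
      have hsplit : xs = xs.takeWhile (fun y => y == x) ++ xs.dropWhile (fun y => y == x) :=
        (List.takeWhile_append_dropWhile).symm
      have hrep : xs.takeWhile (fun y => y == x) =
          List.replicate (xs.takeWhile (fun y => y == x)).length x := by
        apply List.eq_replicate_of_mem
        intro b hb
        have := List.mem_takeWhile_imp hb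
        simpa using this
      have hhead : (xs.dropWhile (fun y => y == x)).head? ≠ some x := by
        intro hc
        have := dropWhile_head_not xs x hc
        simp at this
      have hform : x :: xs =
          List.replicate ((xs.takeWhile (fun y => y == x)).length + 1) x ++
            xs.dropWhile (fun y => y == x) := by
        rw [List.replicate_succ, List.cons_append]
        congr 1
        rw [← hrep]
        exact hsplit
      have hinf := rep_infix_run t c ((xs.takeWhile (fun y => y == x)).length + 1) x
        (xs.dropWhile (fun y => y == x)) hhead
      have hdlen : (xs.dropWhile (fun y => y == x)).length ≤ N := by
        have h1 := (List.dropWhile_sublist (l := xs) (fun y => y == x)).length_le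
        simp only [List.length_cons] at hl
        omega
      have hrec := ih (xs.dropWhile (fun y => y == x)) hdlen
      rw [show has_streak_alt_go t c (x :: xs) =
          (if x = t ∧ (1 + ((xs.takeWhile (fun y => y == x)).length : Int)) ≥ c then true
           else has_streak_alt_go t c (xs.dropWhile (fun y => y == x))) by
        simp only [has_streak_alt_go]]
      rw [hform, hinf]
      by_cases hcond : x = t ∧ (1 + ((xs.takeWhile (fun y => y == x)).length : Int)) ≥ c
      · rw [if_pos hcond]
        simp only [true_iff]
        left
        refine ⟨hcond.1, ?_⟩
        have := hcond.2
        unfold streakNeed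
        omega
      · rw [if_neg hcond, hrec]
        constructor
        · intro h; right; exact h
        · rintro (⟨rfl, hle⟩ | h)
          · exfalso
            apply hcond
            refine ⟨rfl, ?_⟩
            unfold streakNeed at hle
            omega
          · exact h

theorem infix_reverse_iff (t c : Int) (l : List Int) :
    (List.replicate (streakNeed c) t <:+: l.reverse ↔
      List.replicate (streakNeed c) t <:+: l) := by
  constructor
  · intro h
    have := List.reverse_infix.mpr h
    simpa [List.reverse_replicate] using this
  · intro h
    rw [← List.reverse_replicate]
    exact List.reverse_infix.mpr (by simpa [List.reverse_replicate] using h)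

-- ===== VERDICT (by name: the statement is the Claim_ definition above) =====
theorem has_streak_spec : Claim_equal_has_streak := by
  unfold Claim_equal_has_streak
  intro l t c _
  unfold Spec_has_streak has_streak has_streak_alt
  have hA := lemA t c l.reverse 0 le_rfl
  have hB := lemB t c l.length l le_rfl
  have h0 : (max (c - 0) 1).toNat = streakNeed c := by unfold streakNeed; omega
  rw [h0] at hA
  have hA' : has_streak_loop t c 0 l.reverse = true ↔
      List.replicate (streakNeed c) t <:+: l := by
    rw [hA, infix_reverse_iff]
    constructor
    · rintro (h | h)
      · exact (infix_reverse_iff t c l).mp h.isInfix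
      · exact h
    · intro h; right; exact h
  cases hx : has_streak_loop t c 0 l.reverse <;> cases hy : has_streak_alt_go t c l <;>
    simp_all
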